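-- pv_equiv track=rewrite | github.com/khoai23/exam_builder | src/map_algorithm/subregion.py | border_loss
-- ===== SOURCE A (Python) =====
-- from typing import Optional, List, Tuple, Any, Union, Dict, Set
--
-- def border_loss(target_idx: int, recv_idx: int, bordered: Set[Tuple[int, int]], border_count: Dict[int, int]):
--     """Check upon {target_idx} being absorbed to {recv_idx}, lose how many border unit."""
--     count = 0
--     for index in border_count:
--         if index == target_idx or index == recv_idx:
--             continue # not related
--         # for a neutral field; check if it is bordering both the target and recv. If yes, lose 1
--         if (target_idx, index) in bordered or (index, target_idx) in bordered:
--             if (recv_idx, index) in bordered or (index, recv_idx) in bordered: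
--                 count += 1
--     return count
-- ===== SOURCE B (Python) =====
-- def border_loss(target_idx, recv_idx, bordered, border_count):
--     """Check upon {target_idx} being absorbed to {recv_idx}, lose how many border unit."""
--     target_nb = set()
--     recv_nb = set()
--     for a, b in bordered:
--         if a == target_idx:
--             target_nb.add(b)
--         elif b == target_idx:
--             target_nb.add(a)
--         if a == recv_idx:
--             recv_nb.add(b)
--         elif b == recv_idx:
--             recv_nb.add(a)
--     common = (target_nb & recv_nb & set(border_count)) - {target_idx, recv_idx}
--     return len(common)
-- ===== Notes on version B (the rewrite author's own statement) =====
-- stated objective: alternative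
-- what changed: Replaces the per-key membership-probe loop over bordered with one pass that builds the neighbour sets of target and recv, then returns the size of their intersection with the key set minus {target, recv}.
import Mathlib
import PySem

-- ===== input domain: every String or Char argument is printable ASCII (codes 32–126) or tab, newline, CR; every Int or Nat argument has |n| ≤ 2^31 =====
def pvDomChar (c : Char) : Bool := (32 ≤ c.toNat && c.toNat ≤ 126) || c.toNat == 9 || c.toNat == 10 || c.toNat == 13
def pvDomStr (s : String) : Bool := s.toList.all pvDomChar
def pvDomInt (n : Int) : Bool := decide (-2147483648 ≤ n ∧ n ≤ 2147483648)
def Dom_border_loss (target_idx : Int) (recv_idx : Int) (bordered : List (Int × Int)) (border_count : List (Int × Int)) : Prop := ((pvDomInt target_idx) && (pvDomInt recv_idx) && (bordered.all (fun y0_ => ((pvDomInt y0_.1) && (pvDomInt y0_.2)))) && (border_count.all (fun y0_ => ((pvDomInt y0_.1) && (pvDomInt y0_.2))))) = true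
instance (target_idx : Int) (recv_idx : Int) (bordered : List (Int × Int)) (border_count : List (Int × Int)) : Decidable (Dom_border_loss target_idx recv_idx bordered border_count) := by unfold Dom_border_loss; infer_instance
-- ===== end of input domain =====

-- B builds target/recv neighbour sets in one pass over `bordered` and returns the size of
-- their intersection with the key set, instead of probing `bordered` per key (alternative decomposition).

-- ===== PORT A =====
def border_loss (target_idx : Int) (recv_idx : Int) (bordered : List (Int × Int)) (border_count : List (Int × Int)) : Int :=
  ((PySem.Dict.ofList border_count).keys).foldl (fun count index =>
    if index == target_idx || index == recv_idx then count
    else if bordered.contains (target_idx, index) || bordered.contains (index, target_idx) then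
      if bordered.contains (recv_idx, index) || bordered.contains (index, recv_idx) then count + 1
      else count
    else count) 0

-- ===== PORT B =====
def pvNeighbors (v : Int) (bordered : List (Int × Int)) : PySem.Set Int :=
  bordered.foldl (fun s p =>
    if p.1 == v then PySem.Set.add s p.2
    else if p.2 == v then PySem.Set.add s p.1
    else s) PySem.Set.empty

def border_loss_alt (target_idx : Int) (recv_idx : Int) (bordered : List (Int × Int)) (border_count : List (Int × Int)) : Int :=
  let target_nb := pvNeighbors target_idx bordered
  let recv_nb := pvNeighbors recv_idx bordered
  let common := PySem.Set.diff
    (PySem.Set.inter (PySem.Set.inter target_nb recv_nb)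
      (PySem.Set.ofList (border_count.map Prod.fst)))
    (PySem.Set.ofList [target_idx, recv_idx])
  PySem.Set.len common

-- ===== PRECONDITION & SPEC =====
def Spec_border_loss (target_idx : Int) (recv_idx : Int) (bordered : List (Int × Int)) (border_count : List (Int × Int)) (out : Int) : Prop := out = border_loss_alt target_idx recv_idx bordered border_count
instance (target_idx : Int) (recv_idx : Int) (bordered : List (Int × Int)) (border_count : List (Int × Int)) (out : Int) : Decidable (Spec_border_loss target_idx recv_idx bordered border_count out) := by unfold Spec_border_loss; infer_instance

-- ===== CLAIM (what is proved, stated in full; the proofs are below) =====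
def Claim_equal_border_loss : Prop := ∀ (target_idx : Int) (recv_idx : Int) (bordered : List (Int × Int)) (border_count : List (Int × Int)), Dom_border_loss target_idx recv_idx bordered border_count → Spec_border_loss target_idx recv_idx bordered border_count (border_loss target_idx recv_idx bordered border_count)

-- ===== LEMMAS AND PROOFS =====

-- the predicate A tests on each key
def pvP (t r : Int) (bordered : List (Int × Int)) (k : Int) : Bool :=
  !(k == t || k == r) &&
    (bordered.contains (t, k) || bordered.contains (k, t)) &&
    (bordered.contains (r, k) || bordered.contains (k, r))

lemma pvNeighbors_mem_aux (v : Int) (l : List (Int × Int)) (s : PySem.Set Int) (x : Int) :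
    x ∈ l.foldl (fun s p =>
      if p.1 == v then PySem.Set.add s p.2
      else if p.2 == v then PySem.Set.add s p.1
      else s) s ↔ x ∈ s ∨ (v, x) ∈ l ∨ (x, v) ∈ l := by
  induction l generalizing s with
  | nil => simp
  | cons p l ih =>
    obtain ⟨a, b⟩ := p
    simp only [List.foldl_cons, List.mem_cons, ih]
    by_cases ha : a = v <;> by_cases hb : b = v <;>
      simp [ha, hb, PySem.Set.mem_add, Prod.ext_iff] <;> tauto

lemma pvNeighbors_mem (v : Int) (l : List (Int × Int)) (x : Int) :
    x ∈ pvNeighbors v l ↔ (v, x) ∈ l ∨ (x, v) ∈ l := by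
  unfold pvNeighbors
  rw [pvNeighbors_mem_aux]
  simp [PySem.Set.empty]

lemma pvNeighbors_nodup (v : Int) (l : List (Int × Int)) : (pvNeighbors v l).Nodup := by
  unfold pvNeighbors
  generalize hs : (PySem.Set.empty : PySem.Set Int) = s
  have hnd : s.Nodup := by rw [← hs]; simp [PySem.Set.empty]
  clear hs
  induction l generalizing s with
  | nil => exact hnd
  | cons p l ih =>
    simp only [List.foldl_cons]
    split_ifs <;> exact ih _ (by first | exact PySem.Set.nodup_add _ _ hnd | exact hnd)

lemma pvFoldl_count (t r : Int) (bordered : List (Int × Int)) (ks : List Int) (c : Int) :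
    ks.foldl (fun count index =>
      if index == t || index == r then count
      else if bordered.contains (t, index) || bordered.contains (index, t) then
        if bordered.contains (r, index) || bordered.contains (index, r) then count + 1
        else count
      else count) c = c + (ks.countP (pvP t r bordered) : Int) := by
  induction ks generalizing c with
  | nil => simp
  | cons k ks ih =>
    simp only [List.foldl_cons, List.countP_cons, pvP]
    split_ifs with h1 h2 h3 <;> simp_all <;> ring

lemma pvKeys_ofList (bc : List (Int × Int)) :
    (PySem.Dict.ofList bc).keys = PySem.Set.ofList (bc.map Prod.fst) := by
  unfold PySem.Dict.ofList PySem.Dict.update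
  rw [PySem.Dict.keys_foldl_insert_key]
  simp [PySem.Dict.keys_empty, PySem.Set.update_nil_left]

-- ===== VERDICT (by name: the statement is the Claim_ definition above) =====
theorem border_loss_spec : Claim_equal_border_loss := by
  intro t r bordered bc _
  unfold Spec_border_loss border_loss border_loss_alt
  rw [pvKeys_ofList, pvFoldl_count]
  have hperm :
      ((PySem.Set.ofList (bc.map Prod.fst)).filter (pvP t r bordered)).Perm
        (PySem.Set.diff
          (PySem.Set.inter (PySem.Set.inter (pvNeighbors t bordered) (pvNeighbors r bordered))
            (PySem.Set.ofList (bc.map Prod.fst)))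
          (PySem.Set.ofList [t, r])) := by
    rw [List.perm_ext_iff_of_nodup
      ((PySem.Set.nodup_ofList _).filter _)
      (PySem.Set.nodup_diff _ _
        (PySem.Set.nodup_inter _ _
          (PySem.Set.nodup_inter _ _ (pvNeighbors_nodup t bordered))))]
    intro x
    simp only [List.mem_filter, PySem.Set.mem_diff, PySem.Set.mem_inter,
      PySem.Set.mem_ofList, pvNeighbors_mem, pvP, List.mem_cons, List.not_mem_nil,
      Bool.and_eq_true, Bool.not_eq_eq_eq_not, Bool.not_true, Bool.or_eq_true,
      List.contains_eq_mem, decide_eq_true_eq, Bool.or_eq_false_iff, beq_eq_false_iff_ne,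
      List.mem_singleton]
    constructor
    · rintro ⟨hx, ⟨hne, he1⟩, he2⟩
      exact ⟨⟨⟨he1, he2⟩, hx⟩, by rintro (h | h | h) <;> simp_all⟩
    · rintro ⟨⟨⟨he1, he2⟩, hx⟩, hn⟩
      exact ⟨hx, ⟨⟨fun h => hn (Or.inl h), fun h => hn (Or.inr (Or.inl h))⟩, he1⟩, he2⟩
  rw [List.countP_eq_length_filter]
  simp [PySem.Set.len, hperm.length_eq]
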